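-- pv_equiv track=rewrite | github.com/qianlima-lab/SpanDLA | utils.py | get_seq_eval_per_length
-- ===== SOURCE A (Python) =====
-- def get_seq_eval_per_length(gold, pred, length_tp_dict, length_fn_dict):
--     if length_tp_dict is None:
--         length_tp_dict = {tag: 0 for tag in
--                           range(1, 8)}
--     if length_fn_dict is None:
--         length_fn_dict = {l: 0 for l in
--                           range(1, 8)}
--     gold_mass = get_mass(gold)
--     pred_mass = get_mass(pred)
--     for g in gold_mass:
--         length = (int(g[1]) - int(g[0]) + 1) if (int(g[1]) - int(g[0]) + 1) < 7 else 7
--         if g in pred_mass: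
--             length_tp_dict[length] += 1
--         else:
--             length_fn_dict[length] += 1
--     return length_tp_dict, length_fn_dict
--
-- def get_mass(seg):
--     res = []
--     cur = 0
--     for i, x in enumerate(seg):
--         if x > 0:
--             res.append((cur, i, x))
--             cur = i + 1
--     return set(res)
-- ===== SOURCE B (Python) =====
-- def get_seq_eval_per_length(gold, pred, length_tp_dict, length_fn_dict):
--     if length_tp_dict is None:
--         length_tp_dict = dict.fromkeys(range(1, 8), 0)
--     if length_fn_dict is None:
--         length_fn_dict = dict.fromkeys(range(1, 8), 0)
--     cur_g = 0
--     cur_p = 0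
--     for i, x in enumerate(gold):
--         p = pred[i] if i < len(pred) else 0
--         if x > 0:
--             length = min(i - cur_g + 1, 7)
--             if p == x and cur_p == cur_g:
--                 length_tp_dict[length] += 1
--             else:
--                 length_fn_dict[length] += 1
--             cur_g = i + 1
--         if p > 0:
--             cur_p = i + 1
--     return length_tp_dict, length_fn_dict
-- ===== Notes on version B (the rewrite author's own statement) =====
-- stated objective: alternative
-- what changed: B replaces A's two get_mass set constructions and the per-segment hash-membership loop by a single fused pass over the indices that tracks the current segment start of gold and of pred with two cursors and classifies each gold segment on the spot (tp iff pred has the same value at the same end index with the same segment start), touching no sets or tuples.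
import Mathlib
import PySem

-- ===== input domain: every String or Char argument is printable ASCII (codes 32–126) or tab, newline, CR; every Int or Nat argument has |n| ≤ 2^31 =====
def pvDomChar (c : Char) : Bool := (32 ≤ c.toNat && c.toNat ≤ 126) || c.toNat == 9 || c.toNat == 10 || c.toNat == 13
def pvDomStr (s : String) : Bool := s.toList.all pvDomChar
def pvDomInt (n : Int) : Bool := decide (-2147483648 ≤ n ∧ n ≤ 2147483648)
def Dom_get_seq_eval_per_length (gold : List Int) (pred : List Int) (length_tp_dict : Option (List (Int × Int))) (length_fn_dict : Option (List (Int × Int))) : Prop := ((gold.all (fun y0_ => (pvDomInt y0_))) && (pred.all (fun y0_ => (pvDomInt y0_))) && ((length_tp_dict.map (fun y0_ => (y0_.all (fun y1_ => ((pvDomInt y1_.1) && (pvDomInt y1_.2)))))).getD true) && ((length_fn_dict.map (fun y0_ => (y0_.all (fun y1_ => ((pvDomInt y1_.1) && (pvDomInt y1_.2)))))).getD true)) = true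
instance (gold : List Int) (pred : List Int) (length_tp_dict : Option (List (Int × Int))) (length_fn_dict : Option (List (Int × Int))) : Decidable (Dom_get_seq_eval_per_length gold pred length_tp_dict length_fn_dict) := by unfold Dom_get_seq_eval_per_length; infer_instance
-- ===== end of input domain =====

-- B replaces A's two get_mass sets and the hash-membership loop by a single fused pass
-- over the indices with two segment-start cursors (objective: alternative; return-value
-- equivalence only — both Pythons mutate the provided dicts in place in the same way).

-- ===== PORT A =====
-- helper get_mass: builds the list of (cur, i, x) segment triples, then set(res)
def get_mass (seg : List Int) : PySem.Set (Int × Int × Int) :=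
  PySem.Set.ofList
    (((PySem.List.enumerate seg 0).foldl
        (fun (st : List (Int × Int × Int) × Int) ix =>
          if ix.2 > 0 then (st.1 ++ [(st.2, ix.1, ix.2)], ix.1 + 1) else st)
        ([], 0)).1)

def get_seq_eval_per_length (gold : List Int) (pred : List Int) (length_tp_dict : Option (List (Int × Int))) (length_fn_dict : Option (List (Int × Int))) : (List (Int × Int)) × (List (Int × Int)) :=
  -- if length_tp_dict is None: {tag: 0 for tag in range(1, 8)}
  let tp0 : PySem.Dict Int Int :=
    match length_tp_dict with
    | none => (PySem.List.pyRange 1 8 1).foldl (fun d tag => d.insert tag 0) PySem.Dict.empty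
    | some d => PySem.Dict.mk d
  let fn0 : PySem.Dict Int Int :=
    match length_fn_dict with
    | none => (PySem.List.pyRange 1 8 1).foldl (fun d l => d.insert l 0) PySem.Dict.empty
    | some d => PySem.Dict.mk d
  let gold_mass := get_mass gold
  let pred_mass := get_mass pred
  -- for g in gold_mass: …  (increment-only counter updates: the result is iteration-order independent)
  -- d[length] += 1 ported as Dict.modify length 0 (·+1): exact whenever the key is present (Pre_; Python raises KeyError otherwise)
  let st := gold_mass.foldl
    (fun (st : PySem.Dict Int Int × PySem.Dict Int Int) g =>
      let length := if g.2.1 - g.1 + 1 < 7 then g.2.1 - g.1 + 1 else 7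
      if PySem.Set.contains pred_mass g then (st.1.modify length 0 (· + 1), st.2)
      else (st.1, st.2.modify length 0 (· + 1)))
    (tp0, fn0)
  (st.1.items, st.2.items)

-- ===== PORT B =====
def get_seq_eval_per_length_alt (gold : List Int) (pred : List Int) (length_tp_dict : Option (List (Int × Int))) (length_fn_dict : Option (List (Int × Int))) : (List (Int × Int)) × (List (Int × Int)) :=
  -- dict.fromkeys(range(1, 8), 0)
  let tp0 : PySem.Dict Int Int :=
    match length_tp_dict with
    | none => PySem.Dict.mk ((PySem.List.pyRange 1 8 1).map (fun l => (l, 0)))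
    | some d => PySem.Dict.mk d
  let fn0 : PySem.Dict Int Int :=
    match length_fn_dict with
    | none => PySem.Dict.mk ((PySem.List.pyRange 1 8 1).map (fun l => (l, 0)))
    | some d => PySem.Dict.mk d
  -- single fused pass over enumerate(gold); state (cur_g, cur_p, (tp, fn))
  let st := (PySem.List.enumerate gold 0).foldl
    (fun (st : Int × Int × PySem.Dict Int Int × PySem.Dict Int Int) ix =>
      let i := ix.1
      let x := ix.2
      -- p = pred[i] if i < len(pred) else 0
      let p := if i < (pred.length : Int) then PySem.List.pyGetD pred i 0 else 0
      let st1 :=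
        if x > 0 then
          let length := min (i - st.1 + 1) 7
          if p == x && st.2.1 == st.1 then
            (i + 1, st.2.1, st.2.2.1.modify length 0 (· + 1), st.2.2.2)
          else
            (i + 1, st.2.1, st.2.2.1, st.2.2.2.modify length 0 (· + 1))
        else st
      if p > 0 then (st1.1, i + 1, st1.2.2) else st1)
    (0, 0, tp0, fn0)
  (st.2.2.1.items, st.2.2.2.items)

-- ===== PRECONDITION & SPEC =====
-- the segment triples (start, end, value) of a suffix starting at index i with open-segment
-- start c (used only to state Pre_; neither port uses it)
def segsFrom (c i : Int) : List Int → List (Int × Int × Int)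
  | [] => []
  | x :: s => if x > 0 then (c, i, x) :: segsFrom (i + 1) (i + 1) s else segsFrom c (i + 1) s

-- Pre_ excludes exactly (a) the inputs where Python A raises KeyError: a provided tp (resp. fn)
-- dict missing the capped length of some gold segment that does (resp. does not) also occur in
-- pred; and (b) provided association lists with duplicate keys, which cannot arise from a
-- Python dict argument (a dict literal collapses duplicates).
def Pre_get_seq_eval_per_length (gold : List Int) (pred : List Int) (length_tp_dict : Option (List (Int × Int))) (length_fn_dict : Option (List (Int × Int))) : Prop :=
  (∀ d ∈ length_tp_dict, (d.map Prod.fst).Nodup ∧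
     ∀ g ∈ segsFrom 0 0 gold, g ∈ segsFrom 0 0 pred →
       min (g.2.1 - g.1 + 1) 7 ∈ d.map Prod.fst) ∧
  (∀ d ∈ length_fn_dict, (d.map Prod.fst).Nodup ∧
     ∀ g ∈ segsFrom 0 0 gold, g ∉ segsFrom 0 0 pred →
       min (g.2.1 - g.1 + 1) 7 ∈ d.map Prod.fst)
instance (gold : List Int) (pred : List Int) (length_tp_dict : Option (List (Int × Int))) (length_fn_dict : Option (List (Int × Int))) : Decidable (Pre_get_seq_eval_per_length gold pred length_tp_dict length_fn_dict) := by unfold Pre_get_seq_eval_per_length; infer_instance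

def pvWitness_get_seq_eval_per_length : List Int × List Int × (Option (List (Int × Int))) × (Option (List (Int × Int))) :=
  ([1, -1, 2], [1, 0, 2], none, some [(1, 0), (2, 0), (3, 0), (4, 0), (5, 0), (6, 0), (7, 0)])

def Spec_get_seq_eval_per_length (gold : List Int) (pred : List Int) (length_tp_dict : Option (List (Int × Int))) (length_fn_dict : Option (List (Int × Int))) (out : (List (Int × Int)) × (List (Int × Int))) : Prop := out = get_seq_eval_per_length_alt gold pred length_tp_dict length_fn_dict
instance (gold : List Int) (pred : List Int) (length_tp_dict : Option (List (Int × Int))) (length_fn_dict : Option (List (Int × Int))) (out : (List (Int × Int)) × (List (Int × Int))) : Decidable (Spec_get_seq_eval_per_length gold pred length_tp_dict length_fn_dict out) := by unfold Spec_get_seq_eval_per_length; infer_instance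

-- ===== CLAIM (what is proved, stated in full; the proofs are below) =====
def Claim_equal_get_seq_eval_per_length : Prop := ∀ (gold : List Int) (pred : List Int) (length_tp_dict : Option (List (Int × Int))) (length_fn_dict : Option (List (Int × Int))), Dom_get_seq_eval_per_length gold pred length_tp_dict length_fn_dict → Pre_get_seq_eval_per_length gold pred length_tp_dict length_fn_dict → Spec_get_seq_eval_per_length gold pred length_tp_dict length_fn_dict (get_seq_eval_per_length gold pred length_tp_dict length_fn_dict)

-- ===== LEMMAS AND PROOFS =====

-- A's loop body, with the pred mass pm fixed
def astep (pm : List (Int × Int × Int)) (st : PySem.Dict Int Int × PySem.Dict Int Int) (g : Int × Int × Int) : PySem.Dict Int Int × PySem.Dict Int Int :=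
  let length := if g.2.1 - g.1 + 1 < 7 then g.2.1 - g.1 + 1 else 7
  if PySem.Set.contains pm g then (st.1.modify length 0 (· + 1), st.2)
  else (st.1, st.2.modify length 0 (· + 1))

-- B's loop, restated with the remaining pred suffix ps consumed head-wise
def bloop : List Int → List Int → Int → Int → Int → PySem.Dict Int Int → PySem.Dict Int Int → PySem.Dict Int Int × PySem.Dict Int Int
  | [], _, _, _, _, tp, fn => (tp, fn)
  | x :: gs, ps, i, cg, cp, tp, fn =>
    let p := ps.headD 0
    let cp' := if p > 0 then i + 1 else cp
    if x > 0 then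
      let length := min (i - cg + 1) 7
      if p == x && cp == cg then
        bloop gs ps.tail (i + 1) (i + 1) cp' (tp.modify length 0 (· + 1)) fn
      else
        bloop gs ps.tail (i + 1) (i + 1) cp' tp (fn.modify length 0 (· + 1))
    else
      bloop gs ps.tail (i + 1) cg cp' tp fn

lemma segsFrom_snd_ge : ∀ (s : List Int) (c i : Int), ∀ e ∈ segsFrom c i s, i ≤ e.2.1 := by
  intro s
  induction s with
  | nil => intro c i e he; simp [segsFrom] at he
  | cons x s ih =>
    intro c i e he
    simp only [segsFrom] at he
    split at he
    · rcases List.mem_cons.mp he with h | h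
      · subst h; simp
      · have := ih (i + 1) (i + 1) e h; omega
    · have := ih c (i + 1) e he; omega

lemma segsFrom_nodup : ∀ (s : List Int) (c i : Int), (segsFrom c i s).Nodup := by
  intro s
  induction s with
  | nil => intro c i; simp [segsFrom]
  | cons x s ih =>
    intro c i
    simp only [segsFrom]
    split
    · refine List.nodup_cons.mpr ⟨?_, ih (i + 1) (i + 1)⟩
      intro hmem
      have := segsFrom_snd_ge s (i + 1) (i + 1) _ hmem
      simp at this
    · exact ih c (i + 1)

lemma mass_res : ∀ (s : List Int) (acc : List (Int × Int × Int)) (c i : Int),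
    ((PySem.List.enumerate s i).foldl
        (fun (st : List (Int × Int × Int) × Int) ix =>
          if ix.2 > 0 then (st.1 ++ [(st.2, ix.1, ix.2)], ix.1 + 1) else st)
        (acc, c)).1 = acc ++ segsFrom c i s := by
  intro s
  induction s with
  | nil => intro acc c i; simp [PySem.List.enumerate_nil, segsFrom]
  | cons x s ih =>
    intro acc c i
    rw [PySem.List.enumerate_cons]
    simp only [List.foldl_cons, segsFrom]
    by_cases hx : x > 0
    · simp only [hx, if_true]
      rw [ih (acc ++ [(c, i, x)]) (i + 1) (i + 1)]
      simp
    · simp only [hx, if_false]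
      exact ih acc c (i + 1)

lemma get_mass_eq (s : List Int) : get_mass s = segsFrom 0 0 s := by
  unfold get_mass
  rw [mass_res s [] 0 0, List.nil_append]
  exact PySem.Set.ofList_eq_self_of_nodup _ (segsFrom_nodup s 0 0)

lemma segsFrom_cons_pos (c i x : Int) (s : List Int) (hx : x > 0) :
    segsFrom c i (x :: s) = (c, i, x) :: segsFrom (i + 1) (i + 1) s := by
  simp [segsFrom, hx]

lemma segsFrom_cons_nonpos (c i x : Int) (s : List Int) (hx : ¬ x > 0) :
    segsFrom c i (x :: s) = segsFrom c (i + 1) s := by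
  simp [segsFrom, hx]

-- the crux: the fused pass equals A's fold over gold's segments, with the pred mass
-- split as processed part `done` (all second components < i) ++ remaining segments
lemma bloop_eq_afold : ∀ (gs ps : List Int) (i cg cp : Int) (done : List (Int × Int × Int))
    (tp fn : PySem.Dict Int Int), (∀ e ∈ done, e.2.1 < i) →
    bloop gs ps i cg cp tp fn
      = (segsFrom cg i gs).foldl (astep (done ++ segsFrom cp i ps)) (tp, fn) := by
  intro gs
  induction gs with
  | nil => intro ps i cg cp done tp fn _; simp [bloop, segsFrom]
  | cons x gs ih =>
    intro ps i cg cp done tp fn hdone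
    have hlen : (if i - cg + 1 < 7 then i - cg + 1 else 7) = min (i - cg + 1) 7 := by
      rw [min_def]; split <;> split <;> omega
    rcases ps with _ | ⟨q, ps'⟩
    · -- ps = [] : p = 0, pred mass has no segment at index ≥ i
      have hnm : ¬ PySem.Set.contains (done ++ segsFrom cp i ([] : List Int)) (cg, i, x) = true := by
        intro hc
        have hm := (PySem.Set.contains_iff _ _).mp hc
        simp only [segsFrom, List.append_nil] at hm
        have := hdone _ hm
        simp at this
      by_cases hx : x > 0
      · have h0x : ((0 : Int) == x) = false := by simp; omega
        simp only [bloop, List.headD_nil, List.tail_nil, h0x, Bool.false_and,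
          Bool.false_eq_true, if_false, gt_iff_lt, lt_self_iff_false, hx, if_true]
        rw [ih [] (i + 1) (i + 1) cp done tp _ (by intro e he; have := hdone e he; omega)]
        conv_rhs => rw [segsFrom_cons_pos cg i x gs hx, List.foldl_cons]
        have hseg : segsFrom cp (i + 1) ([] : List Int) = segsFrom cp i ([] : List Int) := rfl
        rw [hseg]
        congr 1
        unfold astep
        rw [if_neg hnm, hlen]
      · simp only [bloop, List.headD_nil, List.tail_nil, gt_iff_lt, lt_self_iff_false,
          if_false, hx]
        rw [ih [] (i + 1) cg cp done tp fn (by intro e he; have := hdone e he; omega)]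
        rw [segsFrom_cons_nonpos cg i x gs hx]
        rfl
    · -- ps = q :: ps'
      have hd : (q :: ps').headD 0 = q := rfl
      have ht : (q :: ps').tail = ps' := rfl
      by_cases hq0 : q > 0
      · -- pred has the segment (cp, i, q) at index i
        have hpm : done ++ segsFrom cp i (q :: ps')
            = (done ++ [(cp, i, q)]) ++ segsFrom (i + 1) (i + 1) ps' := by
          rw [segsFrom_cons_pos cp i q ps' hq0]; simp
        have hdone' : ∀ e ∈ done ++ [(cp, i, q)], e.2.1 < i + 1 := by
          intro e he
          rcases List.mem_append.mp he with h | h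
          · have := hdone e h; omega
          · simp at h; subst h; simp
        by_cases hx : x > 0
        · by_cases htest : (q == x && cp == cg) = true
          · -- true positive
            have hmem : PySem.Set.contains (done ++ segsFrom cp i (q :: ps')) (cg, i, x) = true := by
              apply (PySem.Set.contains_iff _ _).mpr
              rcases Bool.and_eq_true_iff.mp htest with ⟨h1, h2⟩
              have h1' := beq_iff_eq.mp h1
              have h2' := beq_iff_eq.mp h2
              rw [segsFrom_cons_pos cp i q ps' hq0]
              subst h1' h2'
              simp
            simp only [bloop, hd, ht, hx, if_true, htest, gt_iff_lt, hq0]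
            rw [ih ps' (i + 1) (i + 1) (i + 1) (done ++ [(cp, i, q)]) _ fn hdone']
            rw [← hpm]
            conv_rhs => rw [segsFrom_cons_pos cg i x gs hx, List.foldl_cons]
            congr 1
            unfold astep
            rw [if_pos hmem, hlen]
          · -- false negative
            have hnm : ¬ PySem.Set.contains (done ++ segsFrom cp i (q :: ps')) (cg, i, x) = true := by
              intro hc
              have hm := (PySem.Set.contains_iff _ _).mp hc
              rcases List.mem_append.mp hm with h | h
              · have := hdone _ h; simp at this
              · rw [segsFrom_cons_pos cp i q ps' hq0] at h
                rcases List.mem_cons.mp h with h | h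
                · simp only [Prod.mk.injEq] at h
                  obtain ⟨h1, _, h3⟩ := h
                  exact htest (by simp [beq_iff_eq, h1, h3])
                · have := segsFrom_snd_ge ps' (i + 1) (i + 1) _ h
                  simp at this
            rw [Bool.not_eq_true] at htest
            simp only [bloop, hd, ht, hx, if_true, htest, Bool.false_eq_true, if_false,
              gt_iff_lt, hq0]
            rw [ih ps' (i + 1) (i + 1) (i + 1) (done ++ [(cp, i, q)]) tp _ hdone']
            rw [← hpm]
            conv_rhs => rw [segsFrom_cons_pos cg i x gs hx, List.foldl_cons]
            congr 1
            unfold astep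
            rw [if_neg hnm, hlen]
        · -- x ≤ 0: no gold segment at i
          simp only [bloop, hd, ht, hx, if_false, gt_iff_lt, hq0, if_true]
          rw [ih ps' (i + 1) cg (i + 1) (done ++ [(cp, i, q)]) tp fn hdone']
          rw [← hpm, segsFrom_cons_nonpos cg i x gs hx]
      · -- q ≤ 0: pred mass unchanged, cursor stays
        have hpm : done ++ segsFrom cp i (q :: ps') = done ++ segsFrom cp (i + 1) ps' := by
          rw [segsFrom_cons_nonpos cp i q ps' hq0]
        have hdone1 : ∀ e ∈ done, e.2.1 < i + 1 := by
          intro e he; have := hdone e he; omega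
        by_cases hx : x > 0
        · have hqx : (q == x) = false := by simp [beq_iff_eq]; omega
          have hnm : ¬ PySem.Set.contains (done ++ segsFrom cp i (q :: ps')) (cg, i, x) = true := by
            intro hc
            have hm := (PySem.Set.contains_iff _ _).mp hc
            rcases List.mem_append.mp hm with h | h
            · have := hdone _ h; simp at this
            · rw [segsFrom_cons_nonpos cp i q ps' hq0] at h
              have := segsFrom_snd_ge ps' cp (i + 1) _ h
              simp at this
          simp only [bloop, hd, ht, hx, if_true, hqx, Bool.false_and, Bool.false_eq_true,
            if_false, gt_iff_lt, hq0]
          rw [ih ps' (i + 1) (i + 1) cp done tp _ hdone1]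
          rw [← hpm]
          conv_rhs => rw [segsFrom_cons_pos cg i x gs hx, List.foldl_cons]
          congr 1
          unfold astep
          rw [if_neg hnm, hlen]
        · simp only [bloop, hd, ht, hx, if_false, gt_iff_lt, hq0]
          rw [ih ps' (i + 1) cg cp done tp fn hdone1]
          rw [← hpm, segsFrom_cons_nonpos cg i x gs hx]

-- B's loop body as a named function (definitionally the port's inline lambda)
def bstep (pred : List Int) (st : Int × Int × PySem.Dict Int Int × PySem.Dict Int Int) (ix : Int × Int) : Int × Int × PySem.Dict Int Int × PySem.Dict Int Int :=
  let i := ix.1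
  let x := ix.2
  let p := if i < (pred.length : Int) then PySem.List.pyGetD pred i 0 else 0
  let st1 :=
    if x > 0 then
      let length := min (i - st.1 + 1) 7
      if p == x && st.2.1 == st.1 then
        (i + 1, st.2.1, st.2.2.1.modify length 0 (· + 1), st.2.2.2)
      else
        (i + 1, st.2.1, st.2.2.1, st.2.2.2.modify length 0 (· + 1))
    else st
  if p > 0 then (st1.1, i + 1, st1.2.2) else st1

-- the two ports' dict initialisations, factored out (definitionally equal to the ports' matches)
def dinitA (o : Option (List (Int × Int))) : PySem.Dict Int Int :=
  match o with
  | none => (PySem.List.pyRange 1 8 1).foldl (fun d tag => d.insert tag 0) PySem.Dict.empty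
  | some d => PySem.Dict.mk d

def dinitB (o : Option (List (Int × Int))) : PySem.Dict Int Int :=
  match o with
  | none => PySem.Dict.mk ((PySem.List.pyRange 1 8 1).map (fun l => (l, 0)))
  | some d => PySem.Dict.mk d

lemma dinit_eq (o : Option (List (Int × Int))) : dinitA o = dinitB o := by
  cases o
  · exact (by decide : dinitA none = dinitB none)
  · rfl

lemma portA_eq (gold pred : List Int) (ltp lfn : Option (List (Int × Int))) :
    get_seq_eval_per_length gold pred ltp lfn
      = (((get_mass gold).foldl (astep (get_mass pred)) (dinitA ltp, dinitA lfn)).1.items,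
         ((get_mass gold).foldl (astep (get_mass pred)) (dinitA ltp, dinitA lfn)).2.items) := rfl

lemma portB_eq (gold pred : List Int) (ltp lfn : Option (List (Int × Int))) :
    get_seq_eval_per_length_alt gold pred ltp lfn
      = ((((PySem.List.enumerate gold 0).foldl (bstep pred) (0, 0, dinitB ltp, dinitB lfn)).2.2.1.items),
         (((PySem.List.enumerate gold 0).foldl (bstep pred) (0, 0, dinitB ltp, dinitB lfn)).2.2.2.items)) := rfl

-- B's port fold (with positional pred access) equals bloop on the remaining pred suffix
lemma fold_eq_bloop (pred : List Int) : ∀ (gs : List Int) (n : Nat) (cg cp : Int)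
    (tp fn : PySem.Dict Int Int),
    ((PySem.List.enumerate gs (n : Int)).foldl (bstep pred) (cg, cp, tp, fn)).2.2
      = bloop gs (pred.drop n) (n : Int) cg cp tp fn := by
  intro gs
  induction gs with
  | nil => intro n cg cp tp fn; simp [PySem.List.enumerate_nil, bloop]
  | cons x gs ihg =>
    intro n cg cp tp fn
    rw [PySem.List.enumerate_cons, List.foldl_cons]
    have hp : (if (n : Int) < (pred.length : Int) then PySem.List.pyGetD pred (n : Int) 0 else 0)
        = (pred.drop n).headD 0 := by
      by_cases h : n < pred.length
      · rw [if_pos (by exact_mod_cast h), PySem.List.pyGetD_natCast,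
          List.headD_eq_head?_getD, List.head?_drop, List.getD_eq_getElem?_getD]
      · rw [if_neg (by exact_mod_cast h), List.drop_eq_nil_of_le (by omega)]; rfl
    have hcast : (n : Int) + 1 = ((n + 1 : Nat) : Int) := by push_cast; ring
    have htail : (pred.drop n).tail = pred.drop (n + 1) := by rw [List.tail_drop]
    set p := (pred.drop n).headD 0 with hpdef
    by_cases hx : x > 0
    · by_cases htest : (p == x && cp == cg) = true
      · by_cases hpp : p > 0
        · rw [show bstep pred (cg, cp, tp, fn) ((n : Int), x)
                = ((n : Int) + 1, (n : Int) + 1, tp.modify (min ((n : Int) - cg + 1) 7) 0 (· + 1), fn) by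
              simp only [bstep, hp, ← hpdef, hx, if_true, htest, hpp, gt_iff_lt]]
          rw [hcast, ihg (n + 1) (((n + 1 : Nat)) : Int) (((n + 1 : Nat)) : Int)]
          simp only [bloop, ← hpdef, hx, if_true, htest, hpp, gt_iff_lt, htail, hcast]
          try simp
        · rw [show bstep pred (cg, cp, tp, fn) ((n : Int), x)
                = ((n : Int) + 1, cp, tp.modify (min ((n : Int) - cg + 1) 7) 0 (· + 1), fn) by
              simp only [bstep, hp, ← hpdef, hx, if_true, htest, hpp, gt_iff_lt, if_false]]
          rw [hcast, ihg (n + 1) (((n + 1 : Nat)) : Int) cp]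
          simp only [bloop, ← hpdef, hx, if_true, htest, hpp, gt_iff_lt, htail, hcast]
          try simp
      · rw [Bool.not_eq_true] at htest
        by_cases hpp : p > 0
        · rw [show bstep pred (cg, cp, tp, fn) ((n : Int), x)
                = ((n : Int) + 1, (n : Int) + 1, tp, fn.modify (min ((n : Int) - cg + 1) 7) 0 (· + 1)) by
              simp only [bstep, hp, ← hpdef, hx, if_true, htest, Bool.false_eq_true, if_false, hpp, gt_iff_lt]]
          rw [hcast, ihg (n + 1) (((n + 1 : Nat)) : Int) (((n + 1 : Nat)) : Int)]
          simp only [bloop, ← hpdef, hx, if_true, htest, Bool.false_eq_true, if_false, hpp, gt_iff_lt, htail, hcast]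
          try simp
        · rw [show bstep pred (cg, cp, tp, fn) ((n : Int), x)
                = ((n : Int) + 1, cp, tp, fn.modify (min ((n : Int) - cg + 1) 7) 0 (· + 1)) by
              simp only [bstep, hp, ← hpdef, hx, if_true, htest, Bool.false_eq_true, if_false, hpp, gt_iff_lt]]
          rw [hcast, ihg (n + 1) (((n + 1 : Nat)) : Int) cp]
          simp only [bloop, ← hpdef, hx, if_true, htest, Bool.false_eq_true, if_false, hpp, gt_iff_lt, htail, hcast]
          try simp
    · by_cases hpp : p > 0
      · rw [show bstep pred (cg, cp, tp, fn) ((n : Int), x)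
              = (cg, (n : Int) + 1, tp, fn) by
            simp only [bstep, hp, ← hpdef, hx, if_false, hpp, gt_iff_lt, if_true]]
        rw [hcast, ihg (n + 1) cg (((n + 1 : Nat)) : Int)]
        simp only [bloop, ← hpdef, hx, if_false, hpp, gt_iff_lt, htail, hcast]
        try simp
      · rw [show bstep pred (cg, cp, tp, fn) ((n : Int), x) = (cg, cp, tp, fn) by
            simp only [bstep, hp, ← hpdef, hx, if_false, hpp, gt_iff_lt]]
        rw [hcast, ihg (n + 1) cg cp]
        simp only [bloop, ← hpdef, hx, if_false, hpp, gt_iff_lt, htail, hcast]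
        try simp

theorem get_seq_eval_per_length_spec : Claim_equal_get_seq_eval_per_length := by
  intro gold pred ltp lfn _ _
  unfold Spec_get_seq_eval_per_length
  rw [portA_eq, portB_eq]
  have hB := fold_eq_bloop pred gold 0 0 0 (dinitB ltp) (dinitB lfn)
  simp only [Nat.cast_zero, List.drop_zero] at hB
  rw [hB]
  have hA := bloop_eq_afold gold pred 0 0 0 [] (dinitB ltp) (dinitB lfn)
    (by intro e he; simp at he)
  simp only [List.nil_append] at hA
  rw [hA]
  rw [get_mass_eq gold, get_mass_eq pred, dinit_eq, dinit_eq]
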